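-- pv_equiv track=rewrite | github.com/TejaRaghuveer/dft-stil-verification-framework | python/ml_pattern_optimization/pattern_ml_analyzer.py | _is_alternating
-- ===== SOURCE A (Python) =====
-- def _is_alternating(s: str) -> bool:
--     if len(s) < 2:
--         return False
--     if s[0] not in ("0", "1"):
--         return False
--     for i in range(1, len(s)):
--         if s[i] not in ("0", "1"):
--             return False
--         if s[i] == s[i - 1]:
--             return False
--     return True
-- ===== SOURCE B (Python) =====
-- def _is_alternating(s: str) -> bool:
--     if len(s) < 2:
--         return False
--     k = len(s) // 2 + 1
--     p1 = ("01" * k)[:len(s)]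
--     p2 = ("10" * k)[:len(s)]
--     return s == p1 or s == p2
-- ===== Notes on version B (the rewrite author's own statement) =====
-- stated objective: simpler
-- what changed: Replaces the per-character scan (digit check plus neighbour comparison at each index) with a whole-string equality test against the two canonical alternating bit patterns truncated to the input length.
import Mathlib
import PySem

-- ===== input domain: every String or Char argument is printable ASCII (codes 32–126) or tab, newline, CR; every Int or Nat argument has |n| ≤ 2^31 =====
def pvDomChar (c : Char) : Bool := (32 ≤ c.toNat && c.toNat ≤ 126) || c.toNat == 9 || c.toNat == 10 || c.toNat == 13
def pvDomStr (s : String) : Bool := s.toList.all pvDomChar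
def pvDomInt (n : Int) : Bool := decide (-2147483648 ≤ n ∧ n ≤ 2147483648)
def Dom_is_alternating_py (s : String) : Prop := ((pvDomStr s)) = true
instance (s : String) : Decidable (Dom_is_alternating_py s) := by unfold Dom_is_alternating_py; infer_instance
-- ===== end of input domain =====

-- B replaces A's per-character scan with a whole-string comparison against the two
-- canonical alternating patterns truncated to the input length (simpler decomposition).


-- ===== PORT A =====
-- the for-loop of A: prev = s[i-1], c = s[i]; branches in A's order
def isAltLoopA (prev : Char) : List Char → Bool
  | [] => true
  | c :: rest =>
    if !(c == '0' || c == '1') then false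
    else if c == prev then false
    else isAltLoopA c rest

def is_alternating_py (s : String) : Bool :=
  match s.toList with
  | [] => false
  | [_] => false
  | c0 :: rest =>
    if !(c0 == '0' || c0 == '1') then false
    else isAltLoopA c0 rest

-- ===== PORT B =====
def is_alternating_py_alt (s : String) : Bool :=
  let l := s.toList
  let n := l.length
  if n < 2 then false
  else
    let k := n / 2 + 1
    let p1 := (List.flatten (List.replicate k ['0', '1'])).take n   -- ("01" * k)[:n]
    let p2 := (List.flatten (List.replicate k ['1', '0'])).take n   -- ("10" * k)[:n]
    l == p1 || l == p2

-- ===== PRECONDITION & SPEC =====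
def Spec_is_alternating_py (s : String) (out : Bool) : Prop := out = is_alternating_py_alt s
instance (s : String) (out : Bool) : Decidable (Spec_is_alternating_py s out) := by unfold Spec_is_alternating_py; infer_instance

-- ===== CLAIM (what is proved, stated in full; the proofs are below) =====
def Claim_equal_is_alternating_py : Prop := ∀ (s : String), Dom_is_alternating_py s → Spec_is_alternating_py s (is_alternating_py s)

-- ===== LEMMAS AND PROOFS =====

def pvFlip (c : Char) : Char := if c == '0' then '1' else '0'

-- the canonical alternating list of length n starting with c
def pvAlt (c : Char) : Nat → List Char
  | 0 => []
  | n + 1 => c :: pvAlt (pvFlip c) n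

theorem pvAlt_take (c : Char) (hc : c = '0' ∨ c = '1') :
    ∀ (k n : Nat), n ≤ 2 * k →
      (List.flatten (List.replicate k [c, pvFlip c])).take n = pvAlt c n := by
  intro k
  induction k with
  | zero => intro n hn; interval_cases n; simp [pvAlt]
  | succ k ih =>
    intro n hn
    match n with
    | 0 => simp [pvAlt]
    | 1 =>
      simp [List.replicate_succ, pvAlt]
    | n + 2 =>
      have h2 : pvFlip (pvFlip c) = c := by rcases hc with h | h <;> simp [h, pvFlip]
      simp only [List.replicate_succ, List.flatten_cons, List.cons_append, List.take_succ_cons,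
        List.nil_append, pvAlt, h2]
      rw [ih n (by omega)]

theorem isAltLoopA_eq (l : List Char) : ∀ (c : Char), (c = '0' ∨ c = '1') →
    isAltLoopA c l = (l == pvAlt (pvFlip c) l.length) := by
  induction l with
  | nil => intro c _; simp [isAltLoopA, pvAlt]
  | cons d rest ih =>
    intro c hc
    have hfc : pvFlip c = '0' ∨ pvFlip c = '1' := by
      rcases hc with h | h <;> simp [h, pvFlip]
    have hne : pvFlip c ≠ c := by rcases hc with h | h <;> simp [h, pvFlip]
    have h2 : pvFlip (pvFlip c) = c := by rcases hc with h | h <;> simp [h, pvFlip]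
    simp only [isAltLoopA, List.length_cons, pvAlt, List.cons_beq_cons]
    by_cases hd : d = '0' ∨ d = '1'
    · have hdtrue : (d == '0' || d == '1') = true := by rcases hd with h | h <;> simp [h]
      rw [hdtrue]
      simp only [Bool.not_true, Bool.false_eq_true, if_false]
      by_cases hdc : d = c
      · subst hdc
        simp [Ne.symm hne]
      · have hdf : d = pvFlip c := by
          rcases hc with h | h <;> rcases hd with h' | h' <;> simp_all [pvFlip]
        rw [if_neg (by simp only [beq_iff_eq]; exact hdc), ih d (by rw [hdf]; exact hfc), hdf, h2]
        simp
    · have hdfalse : (d == '0' || d == '1') = false := by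
        push Not at hd; simp [hd.1, hd.2]
      rw [hdfalse]
      have : (d == pvFlip c) = false := by
        rcases hfc with h | h <;> rw [h] <;> push Not at hd <;> simp [hd.1, hd.2]
      simp [this]

-- heads differ ⇒ not equal to the other pattern
theorem pvAlt_head_ne (c d : Char) (h : c ≠ d) (n : Nat) (l : List Char) :
    ((c :: l) == pvAlt d (n + 1)) = false := by
  simp [pvAlt, h]

-- ===== VERDICT (by name: the statement is the Claim_ definition above) =====
theorem is_alternating_py_spec : Claim_equal_is_alternating_py := by
  intro s _
  unfold Spec_is_alternating_py is_alternating_py is_alternating_py_alt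
  match hl : s.toList with
  | [] => simp
  | [c] => simp
  | c0 :: c1 :: rest =>
    have hn : ¬ ((c0 :: c1 :: rest).length < 2) := by simp
    simp only [hn, if_false]
    set l := c0 :: c1 :: rest with hldef
    have hlen : l.length = rest.length + 2 := by simp [hldef]
    have hk : l.length ≤ 2 * (l.length / 2 + 1) := by omega
    have hp1 := pvAlt_take '0' (Or.inl rfl) (l.length / 2 + 1) l.length hk
    have hp2 := pvAlt_take '1' (Or.inr rfl) (l.length / 2 + 1) l.length hk
    have hf0 : pvFlip '0' = '1' := by simp [pvFlip]
    have hf1 : pvFlip '1' = '0' := by simp [pvFlip]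
    rw [hf0] at hp1; rw [hf1] at hp2
    simp only [hp1, hp2]
    by_cases hc : c0 = '0' ∨ c0 = '1'
    · have hctrue : (c0 == '0' || c0 == '1') = true := by rcases hc with h | h <;> simp [h]
      rw [hctrue]
      simp only [Bool.not_true, Bool.false_eq_true, if_false]
      rw [isAltLoopA_eq (c1 :: rest) c0 hc]
      rcases hc with h | h <;> subst h
      · rw [show l.length = (c1 :: rest).length + 1 by simp [hldef]]
        rw [pvAlt_head_ne '0' '1' (by decide) ((c1 :: rest).length) (c1 :: rest)]
        simp [hldef, pvAlt, pvFlip]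
      · rw [show l.length = (c1 :: rest).length + 1 by simp [hldef]]
        rw [pvAlt_head_ne '1' '0' (by decide) ((c1 :: rest).length) (c1 :: rest)]
        simp [hldef, pvAlt, pvFlip]
    · have hcfalse : (c0 == '0' || c0 == '1') = false := by
        push Not at hc; simp [hc.1, hc.2]
      rw [hcfalse]
      rw [show l.length = (c1 :: rest).length + 1 by simp [hldef]]
      push Not at hc
      rw [hldef, pvAlt_head_ne c0 '0' hc.1 _ _, pvAlt_head_ne c0 '1' hc.2 _ _]
      simp
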